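-- pv_equiv track=rewrite | github.com/FOI-Bioinformatics/baitUtils | baitUtils/reference_analyzer.py | _count_tandem_repeats
-- ===== SOURCE A (Python) =====
-- def _count_tandem_repeats(sequence: str) -> int:
--     """Count simple tandem repeats."""
--     if len(sequence) < 6:
--         return 0
--
--     repeat_count = 0
--
--     # Look for 2-6 bp repeats
--     for unit_size in range(2, 7):
--         for i in range(len(sequence) - unit_size * 2 + 1):
--             unit = sequence[i:i+unit_size]
--             if 'N' in unit:
--                 continue
--
--             # Check if this unit repeats
--             repeats = 1
--             pos = i + unit_size
--
--             while pos + unit_size <= len(sequence) and sequence[pos:pos+unit_size] == unit: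
--                 repeats += 1
--                 pos += unit_size
--
--             if repeats >= 3:  # At least 3 copies
--                 repeat_count += repeats * unit_size
--
--     return repeat_count
-- ===== SOURCE B (Python) =====
-- def _count_tandem_repeats(sequence: str) -> int:
--     """Count simple tandem repeats (backward DP: run length per unit size in one pass)."""
--     n = len(sequence)
--     if n < 6:
--         return 0
--     total = 0
--     for u in range(2, 7):
--         r = [1] * (n + 1)
--         for i in range(n - 2 * u, -1, -1):
--             if sequence[i:i + u] == sequence[i + u:i + 2 * u]:
--                 r[i] = 1 + r[i + u]
--         for i in range(n - 2 * u + 1):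
--             unit = sequence[i:i + u]
--             if 'N' not in unit and r[i] >= 3:
--                 total += r[i] * u
--     return total
-- ===== Notes on version B (the rewrite author's own statement) =====
-- stated objective: faster
-- what changed: Replaces A's per-start-position while-loop rescanning (repeat count recomputed from scratch at every i) by one backward dynamic-programming pass per unit size, r[i] = 1 + r[i+u] when adjacent u-blocks are equal, so each repeat run length is read off in O(1).
import Mathlib
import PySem

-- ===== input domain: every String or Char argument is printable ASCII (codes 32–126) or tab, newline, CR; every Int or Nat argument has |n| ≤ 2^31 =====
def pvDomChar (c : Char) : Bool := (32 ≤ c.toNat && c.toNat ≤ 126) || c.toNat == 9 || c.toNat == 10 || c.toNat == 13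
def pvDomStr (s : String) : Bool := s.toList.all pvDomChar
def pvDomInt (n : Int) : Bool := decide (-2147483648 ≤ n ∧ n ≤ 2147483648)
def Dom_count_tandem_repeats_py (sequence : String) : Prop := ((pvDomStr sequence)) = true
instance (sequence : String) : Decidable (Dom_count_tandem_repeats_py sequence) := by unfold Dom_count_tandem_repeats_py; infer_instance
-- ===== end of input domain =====

-- B replaces A's per-start rescanning while-loop by one backward DP pass per unit size
-- (r[i] = 1 + r[i+u] when adjacent blocks are equal): objective = faster (asymptotic in A's worst case).

-- sequence[i:i+u] for natural i, u: equals PySem.List.slice s i (i+u) by PySem.List.slice_natCast_add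
def pvBlock (s : List Char) (u i : Nat) : List Char := (s.drop i).take u

-- ===== PORT A =====
-- A's while loop: repeats = 1; while pos+u <= len(s) and s[pos:pos+u] == unit: repeats += 1; pos += u
-- fuel (first Nat argument) only makes the loop total; called with fuel = len(s)+1, always enough.
def pvGRep (s : List Char) (unit : List Char) (u : Nat) : Nat → Nat → Int
  | 0, _ => 1
  | fuel+1, pos =>
    if pos + u ≤ s.length ∧ pvBlock s u pos = unit then 1 + pvGRep s unit u fuel (pos + u) else 1

def count_tandem_repeats_py (sequence : String) : Int :=
  let s := sequence.toList
  let n := s.length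
  if n < 6 then 0
  else
    -- for unit_size in range(2, 7)
    [2, 3, 4, 5, 6].foldl (fun acc u =>
      -- for i in range(len(sequence) - unit_size*2 + 1): empty when negative, = List.range (n+1-2u)
      (List.range (n + 1 - 2 * u)).foldl (fun acc i =>
        let unit := pvBlock s u i
        if unit.contains 'N' then acc
        else
          let repeats := pvGRep s unit u (n + 1) (i + u)
          if 3 ≤ repeats then acc + repeats * (u : Int) else acc) acc) 0

-- ===== PORT B =====
-- Source B's backward loop: for i in range(n-2u, -1, -1): if s[i:i+u]==s[i+u:i+2u]: r[i] = 1 + r[i+u]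
-- counter k+1 means current index i = k; called with k = n+1-2u (number of iterations).
def pvBLoop (s : List Char) (u : Nat) (r : List Int) : Nat → List Int
  | 0 => r
  | k+1 =>
    let r' := if pvBlock s u k = pvBlock s u (k + u) then r.set k (1 + r.getD (k + u) 0) else r
    pvBLoop s u r' k

def count_tandem_repeats_py_alt (sequence : String) : Int :=
  let s := sequence.toList
  let n := s.length
  if n < 6 then 0
  else
    [2, 3, 4, 5, 6].foldl (fun total u =>
      let r := pvBLoop s u (List.replicate (n + 1) 1) (n + 1 - 2 * u)
      (List.range (n + 1 - 2 * u)).foldl (fun total i =>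
        let unit := pvBlock s u i
        if unit.contains 'N' = false ∧ 3 ≤ r.getD i 0 then total + r.getD i 0 * (u : Int)
        else total) total) 0

-- ===== PRECONDITION & SPEC =====
def Spec_count_tandem_repeats_py (sequence : String) (out : Int) : Prop := out = count_tandem_repeats_py_alt sequence
instance (sequence : String) (out : Int) : Decidable (Spec_count_tandem_repeats_py sequence out) := by unfold Spec_count_tandem_repeats_py; infer_instance

-- ===== CLAIM (what is proved, stated in full; the proofs are below) =====
def Claim_equal_count_tandem_repeats_py : Prop := ∀ (sequence : String), Dom_count_tandem_repeats_py sequence → Spec_count_tandem_repeats_py sequence (count_tandem_repeats_py sequence)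

-- ===== LEMMAS AND PROOFS =====

-- f: the DP recurrence B computes, fuel-based
def pvFRep (s : List Char) (u : Nat) : Nat → Nat → Int
  | 0, _ => 1
  | fuel+1, i =>
    if i + 2 * u ≤ s.length ∧ pvBlock s u i = pvBlock s u (i + u) then
      1 + pvFRep s u fuel (i + u)
    else 1

theorem pvFRep_one (s : List Char) (u fuel i : Nat)
    (h : ¬ (i + 2 * u ≤ s.length ∧ pvBlock s u i = pvBlock s u (i + u))) :
    pvFRep s u fuel i = 1 := by
  cases fuel <;> simp [pvFRep, h]

theorem pvFRep_fuel (s : List Char) (u : Nat) (hu : 1 ≤ u) :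
    ∀ f1 f2 i, s.length - i ≤ f1 → s.length - i ≤ f2 →
      pvFRep s u f1 i = pvFRep s u f2 i := by
  intro f1
  induction f1 with
  | zero =>
    intro f2 i h1 h2
    have hc : ¬ (i + 2 * u ≤ s.length ∧ pvBlock s u i = pvBlock s u (i + u)) := by
      rintro ⟨hle, -⟩; omega
    rw [pvFRep_one s u 0 i hc, pvFRep_one s u f2 i hc]
  | succ f1 ih =>
    intro f2 i h1 h2
    cases f2 with
    | zero =>
      have hc : ¬ (i + 2 * u ≤ s.length ∧ pvBlock s u i = pvBlock s u (i + u)) := by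
        rintro ⟨hle, -⟩; omega
      rw [pvFRep_one s u (f1+1) i hc, pvFRep_one s u 0 i hc]
    | succ f2 =>
      by_cases hc : i + 2 * u ≤ s.length ∧ pvBlock s u i = pvBlock s u (i + u)
      · simp only [pvFRep, if_pos hc]
        rw [ih f2 (i + u) (by omega) (by omega)]
      · simp only [pvFRep, if_neg hc]

-- A's while loop started at i+u with unit = block i computes exactly the DP value at i.
theorem pvGRep_eq_fRep (s : List Char) (u : Nat) :
    ∀ fuel i, i + u ≤ s.length →
      pvGRep s (pvBlock s u i) u fuel (i + u) = pvFRep s u fuel i := by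
  intro fuel
  induction fuel with
  | zero => intro i _; rfl
  | succ fuel ih =>
    intro i hi
    by_cases hc : i + 2 * u ≤ s.length ∧ pvBlock s u i = pvBlock s u (i + u)
    · have hg : (i + u) + u ≤ s.length ∧ pvBlock s u (i + u) = pvBlock s u i :=
        ⟨by omega, hc.2.symm⟩
      simp only [pvGRep, pvFRep, if_pos hc, if_pos hg]
      have h2 : i + u + u = (i + u) + u := rfl
      rw [hc.2, ih (i + u) (by omega)]
    · have hg : ¬ ((i + u) + u ≤ s.length ∧ pvBlock s u (i + u) = pvBlock s u i) := by
        rintro ⟨h1, h2⟩; exact hc ⟨by omega, h2.symm⟩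
      simp only [pvGRep, pvFRep, if_neg hc, if_neg hg]

-- the backward loop fills r with the DP values
theorem pvBLoop_invariant (s : List Char) (u : Nat) (hu : 1 ≤ u) :
    ∀ k r, k ≤ s.length + 1 - 2 * u →
      (∀ j, k ≤ j → j ≤ s.length → r.getD j 0 = pvFRep s u (s.length + 1) j) →
      (∀ j, j < k → r.getD j 0 = 1) →
      r.length = s.length + 1 →
      ∀ j, j ≤ s.length →
        (pvBLoop s u r k).getD j 0 = pvFRep s u (s.length + 1) j := by
  intro k
  induction k with
  | zero =>
    intro r _ hhi _ _ j hj
    exact hhi j (Nat.zero_le j) hj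
  | succ k ih =>
    intro r hk hhi hlo hlen j hj
    simp only [pvBLoop]
    by_cases hc : pvBlock s u k = pvBlock s u (k + u)
    · rw [if_pos hc]
      refine ih _ (by omega) ?_ ?_ (by simp [hlen]) j hj
      · intro j hkj hjn
        by_cases hjk : j = k
        · subst hjk
          have hget : (r.set j (1 + r.getD (j + u) 0)).getD j 0 = 1 + r.getD (j + u) 0 := by
            simp [List.getD, List.getElem?_set_self (by omega : j < r.length)]
          have hcnd : j + 2 * u ≤ s.length ∧ pvBlock s u j = pvBlock s u (j + u) :=
            ⟨by omega, hc⟩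
          have hstep : pvFRep s u (s.length + 1) j = 1 + pvFRep s u s.length (j + u) := by
            simp only [pvFRep, if_pos hcnd]
          rw [hget, hhi (j + u) (by omega) (by omega), hstep]
          rw [pvFRep_fuel s u hu (s.length + 1) s.length (j + u) (by omega) (by omega)]
        · have : (r.set k (1 + r.getD (k + u) 0)).getD j 0 = r.getD j 0 := by
            simp [List.getD, List.getElem?_set_ne (fun h => hjk h.symm)]
          rw [this]
          exact hhi j (by omega) hjn
      · intro j hjk
        have hne : k ≠ j := by omega
        have : (r.set k (1 + r.getD (k + u) 0)).getD j 0 = r.getD j 0 := by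
          simp [List.getD, List.getElem?_set_ne hne]
        rw [this]
        exact hlo j (by omega)
    · rw [if_neg hc]
      refine ih r (by omega) ?_ (fun j hj' => hlo j (by omega)) hlen j hj
      intro j hkj hjn
      by_cases hjk : j = k
      · subst hjk
        rw [hlo j (by omega)]
        rw [pvFRep_one s u _ j (by rintro ⟨-, h⟩; exact hc h)]
      · exact hhi j (by omega) hjn

theorem pvBLoop_getD (s : List Char) (u : Nat) (hu : 1 ≤ u) (j : Nat) (hj : j ≤ s.length) :
    (pvBLoop s u (List.replicate (s.length + 1) 1) (s.length + 1 - 2 * u)).getD j 0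
      = pvFRep s u (s.length + 1) j := by
  refine pvBLoop_invariant s u hu _ _ le_rfl ?_ ?_ (by simp) j hj
  · intro j hkj hjn
    have h1 : (List.replicate (s.length + 1) (1 : Int)).getD j 0 = 1 := by
      simp [List.getD, show j < s.length + 1 from by omega]
    rw [h1, pvFRep_one s u _ j (by rintro ⟨h, -⟩; omega)]
  · intro j hjk
    simp [List.getD, show j < s.length + 1 from by omega]

theorem pv_inner_eq (s : List Char) (u : Nat) (hu : 1 ≤ u) (acc : Int) :
    (List.range (s.length + 1 - 2 * u)).foldl (fun acc i =>
        if (pvBlock s u i).contains 'N' = true then acc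
        else
          if 3 ≤ pvGRep s (pvBlock s u i) u (s.length + 1) (i + u) then
            acc + pvGRep s (pvBlock s u i) u (s.length + 1) (i + u) * (u : Int)
          else acc) acc
    = (List.range (s.length + 1 - 2 * u)).foldl (fun total i =>
        if (pvBlock s u i).contains 'N' = false ∧
            3 ≤ (pvBLoop s u (List.replicate (s.length + 1) 1) (s.length + 1 - 2 * u)).getD i 0 then
          total + (pvBLoop s u (List.replicate (s.length + 1) 1) (s.length + 1 - 2 * u)).getD i 0 * (u : Int)
        else total) acc := by
  apply PySem.List.foldl_congr_mem
  intro acc i hi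
  have hi' : i < s.length + 1 - 2 * u := List.mem_range.mp hi
  have hval : pvGRep s (pvBlock s u i) u (s.length + 1) (i + u)
      = (pvBLoop s u (List.replicate (s.length + 1) 1) (s.length + 1 - 2 * u)).getD i 0 := by
    rw [pvBLoop_getD s u hu i (by omega)]
    exact pvGRep_eq_fRep s u (s.length + 1) i (by omega)
  rw [← hval]
  by_cases hN : 'N' ∈ pvBlock s u i
  · simp [hN]
  · by_cases h3 : 3 ≤ pvGRep s (pvBlock s u i) u (s.length + 1) (i + u) <;> simp [hN, h3]

-- ===== VERDICT (by name: the statement is the Claim_ definition above) =====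
theorem count_tandem_repeats_py_spec : Claim_equal_count_tandem_repeats_py := by
  intro sequence _
  unfold Spec_count_tandem_repeats_py count_tandem_repeats_py count_tandem_repeats_py_alt
  simp only []
  by_cases h6 : sequence.toList.length < 6
  · rw [if_pos h6, if_pos h6]
  · rw [if_neg h6, if_neg h6]
    apply PySem.List.foldl_congr_mem
    intro acc u hu
    have hu1 : 1 ≤ u := by
      simp only [List.mem_cons, List.not_mem_nil, or_false] at hu
      rcases hu with h | h | h | h | h <;> omega
    exact pv_inner_eq sequence.toList u hu1 acc
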